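-- pv_equiv track=rewrite | github.com/cinfis1977/final | improved_simulation_STABLE_v17_xy_quadrupole_drive_ANISO_PHYS_TENSOR_PHYS_FIXED4.py | iter_neighbors
-- ===== SOURCE A (Python) =====
-- def lattice_index(i: int, j: int, k: int, nx: int, ny: int, nz: int) -> int:
--     return (i * ny * nz) + (j * nz) + k
--
-- def iter_neighbors(nx: int, ny: int, nz: int):
--     for i in range(nx):
--         for j in range(ny):
--             for k in range(nz):
--                 a = lattice_index(i, j, k, nx, ny, nz)
--                 if i + 1 < nx:
--                     yield a, lattice_index(i + 1, j, k, nx, ny, nz)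
--                 if j + 1 < ny:
--                     yield a, lattice_index(i, j + 1, k, nx, ny, nz)
--                 if k + 1 < nz:
--                     yield a, lattice_index(i, j, k + 1, nx, ny, nz)
-- ===== SOURCE B (Python) =====
-- def iter_neighbors(nx: int, ny: int, nz: int):
--     # Generate the three edge families (x-, y-, z-direction) as independent
--     # comprehensions over the flat cell index, then sort them into lattice
--     # order: ascending cell index, and within a cell by descending neighbor
--     # index (x-neighbor has the largest stride, then y, then z).
--     if nx <= 0 or ny <= 0 or nz <= 0:
--         return
--     S = ny * nz
--     n = nx * S
--     xs = [(a, a + S) for a in range(n) if a + S < n]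
--     ys = [(a, a + nz) for a in range(n) if a % S + nz < S]
--     zs = [(a, a + 1) for a in range(n) if a % nz + 1 < nz]
--     yield from sorted(xs + ys + zs, key=lambda e: (e[0], -e[1]))
-- ===== Notes on version B (the rewrite author's own statement) =====
-- stated objective: alternative
-- what changed: Instead of one nested i/j/k sweep interleaving the three neighbor tests per cell, B builds the x-, y- and z-direction edge families as three independent comprehensions over the flat cell index and then sorts their concatenation into lattice order by the key (cell, -neighbor).
import Mathlib
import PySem

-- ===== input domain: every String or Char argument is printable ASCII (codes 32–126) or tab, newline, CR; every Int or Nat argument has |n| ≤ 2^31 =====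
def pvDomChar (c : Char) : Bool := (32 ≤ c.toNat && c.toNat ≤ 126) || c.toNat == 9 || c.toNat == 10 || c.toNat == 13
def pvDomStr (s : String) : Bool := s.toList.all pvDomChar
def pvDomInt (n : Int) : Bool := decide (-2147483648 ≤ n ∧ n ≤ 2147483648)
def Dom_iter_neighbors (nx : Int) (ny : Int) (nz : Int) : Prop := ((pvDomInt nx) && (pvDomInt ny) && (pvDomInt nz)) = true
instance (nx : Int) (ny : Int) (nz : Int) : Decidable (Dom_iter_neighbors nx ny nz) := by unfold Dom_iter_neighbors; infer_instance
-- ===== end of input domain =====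

-- B generates the x-, y- and z-direction edge families as three independent comprehensions
-- over the flat cell index and sorts their concatenation into lattice order by the key
-- (cell, -neighbor) (objective: alternative algorithm, generate-then-sort).

-- ===== PORT A =====
def lattice_index (i : Int) (j : Int) (k : Int) (nx : Int) (ny : Int) (nz : Int) : Int :=
  (i * ny * nz) + (j * nz) + k

def iter_neighbors (nx : Int) (ny : Int) (nz : Int) : List (Int × Int) :=
  (PySem.List.pyRange 0 nx 1).foldl (fun acc i =>
    (PySem.List.pyRange 0 ny 1).foldl (fun acc j =>
      (PySem.List.pyRange 0 nz 1).foldl (fun acc k =>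
        let a := lattice_index i j k nx ny nz
        let acc1 := if i + 1 < nx then acc ++ [(a, lattice_index (i+1) j k nx ny nz)] else acc
        let acc2 := if j + 1 < ny then acc1 ++ [(a, lattice_index i (j+1) k nx ny nz)] else acc1
        if k + 1 < nz then acc2 ++ [(a, lattice_index i j (k+1) nx ny nz)] else acc2) acc) acc) []

-- ===== PORT B =====
def iter_neighbors_alt (nx : Int) (ny : Int) (nz : Int) : List (Int × Int) :=
  if nx ≤ 0 ∨ ny ≤ 0 ∨ nz ≤ 0 then []
  else
    let S := ny * nz
    let n := nx * S
    let xs := (PySem.List.pyRange 0 n 1).foldl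
      (fun acc a => if a + S < n then acc ++ [(a, a + S)] else acc) []
    let ys := (PySem.List.pyRange 0 n 1).foldl
      (fun acc a => if PySem.Int.mod a S + nz < S then acc ++ [(a, a + nz)] else acc) []
    let zs := (PySem.List.pyRange 0 n 1).foldl
      (fun acc a => if PySem.Int.mod a nz + 1 < nz then acc ++ [(a, a + 1)] else acc) []
    PySem.List.sorted2 (xs ++ ys ++ zs) (fun e => e.1) (fun e => -e.2)

-- ===== PRECONDITION & SPEC =====
def Spec_iter_neighbors (nx : Int) (ny : Int) (nz : Int) (out : List (Int × Int)) : Prop := out = iter_neighbors_alt nx ny nz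
instance (nx : Int) (ny : Int) (nz : Int) (out : List (Int × Int)) : Decidable (Spec_iter_neighbors nx ny nz out) := by unfold Spec_iter_neighbors; infer_instance

-- ===== CLAIM (what is proved, stated in full; the proofs are below) =====
def Claim_equal_iter_neighbors : Prop := ∀ (nx : Int) (ny : Int) (nz : Int), Dom_iter_neighbors nx ny nz → Spec_iter_neighbors nx ny nz (iter_neighbors nx ny nz)

-- ===== LEMMAS AND PROOFS =====

-- per-cell contribution of A's loop body
def cellA (nx : Int) (ny : Int) (nz : Int) (i : Int) (j : Int) (k : Int) : List (Int × Int) :=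
  (if i + 1 < nx then [(lattice_index i j k nx ny nz, lattice_index (i+1) j k nx ny nz)] else []) ++
  ((if j + 1 < ny then [(lattice_index i j k nx ny nz, lattice_index i (j+1) k nx ny nz)] else []) ++
  (if k + 1 < nz then [(lattice_index i j k nx ny nz, lattice_index i j (k+1) nx ny nz)] else []))

-- the three per-cell edge families of B, and their combination
def cellX (S : Int) (n : Int) (a : Int) : List (Int × Int) :=
  if a + S < n then [(a, a + S)] else []
def cellY (S : Int) (nz : Int) (a : Int) : List (Int × Int) :=
  if PySem.Int.mod a S + nz < S then [(a, a + nz)] else []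
def cellZ (nz : Int) (a : Int) : List (Int × Int) :=
  if PySem.Int.mod a nz + 1 < nz then [(a, a + 1)] else []
def cellC (S : Int) (n : Int) (nz : Int) (a : Int) : List (Int × Int) :=
  cellX S n a ++ (cellY S nz a ++ cellZ nz a)

-- Python's comparison "key(x) < key(y)" for the tuple key (e[0], -e[1])
def pvBefore (x y : Int × Int) : Bool :=
  decide (x.1 < y.1) || (!decide (y.1 < x.1) && decide (-x.2 < -y.2))

theorem pvBefore_iff (x y : Int × Int) :
    pvBefore x y = true ↔ (x.1 < y.1 ∨ (x.1 = y.1 ∧ y.2 < x.2)) := by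
  simp only [pvBefore, Bool.or_eq_true, Bool.and_eq_true, Bool.not_eq_true', decide_eq_true_eq,
    decide_eq_false_iff_not]
  omega

theorem A_flat (nx ny nz : Int) :
    iter_neighbors nx ny nz =
      (PySem.List.pyRange 0 nx 1).flatMap (fun i =>
        (PySem.List.pyRange 0 ny 1).flatMap (fun j =>
          (PySem.List.pyRange 0 nz 1).flatMap (fun k => cellA nx ny nz i j k))) := by
  have h1 : ∀ (i j : Int) (acc : List (Int × Int)),
      (PySem.List.pyRange 0 nz 1).foldl (fun acc k =>
        let a := lattice_index i j k nx ny nz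
        let acc1 := if i + 1 < nx then acc ++ [(a, lattice_index (i+1) j k nx ny nz)] else acc
        let acc2 := if j + 1 < ny then acc1 ++ [(a, lattice_index i (j+1) k nx ny nz)] else acc1
        if k + 1 < nz then acc2 ++ [(a, lattice_index i j (k+1) nx ny nz)] else acc2) acc
      = acc ++ (PySem.List.pyRange 0 nz 1).flatMap (fun k => cellA nx ny nz i j k) := by
    intro i j acc
    rw [show (fun acc k =>
        let a := lattice_index i j k nx ny nz
        let acc1 := if i + 1 < nx then acc ++ [(a, lattice_index (i+1) j k nx ny nz)] else acc
        let acc2 := if j + 1 < ny then acc1 ++ [(a, lattice_index i (j+1) k nx ny nz)] else acc1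
        if k + 1 < nz then acc2 ++ [(a, lattice_index i j (k+1) nx ny nz)] else acc2)
        = (fun (acc : List (Int × Int)) k => acc ++ cellA nx ny nz i j k) from by
      funext acc k
      simp only [cellA]
      split_ifs <;> simp]
    exact PySem.List.foldl_append_eq_flatMap _ _ _
  have h2 : ∀ (i : Int) (acc : List (Int × Int)),
      (PySem.List.pyRange 0 ny 1).foldl (fun acc j =>
        (PySem.List.pyRange 0 nz 1).foldl (fun acc k =>
          let a := lattice_index i j k nx ny nz
          let acc1 := if i + 1 < nx then acc ++ [(a, lattice_index (i+1) j k nx ny nz)] else acc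
          let acc2 := if j + 1 < ny then acc1 ++ [(a, lattice_index i (j+1) k nx ny nz)] else acc1
          if k + 1 < nz then acc2 ++ [(a, lattice_index i j (k+1) nx ny nz)] else acc2) acc) acc
      = acc ++ (PySem.List.pyRange 0 ny 1).flatMap (fun j =>
          (PySem.List.pyRange 0 nz 1).flatMap (fun k => cellA nx ny nz i j k)) := by
    intro i acc
    rw [show (fun (acc : List (Int × Int)) j =>
        (PySem.List.pyRange 0 nz 1).foldl (fun acc k =>
          let a := lattice_index i j k nx ny nz
          let acc1 := if i + 1 < nx then acc ++ [(a, lattice_index (i+1) j k nx ny nz)] else acc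
          let acc2 := if j + 1 < ny then acc1 ++ [(a, lattice_index i (j+1) k nx ny nz)] else acc1
          if k + 1 < nz then acc2 ++ [(a, lattice_index i j (k+1) nx ny nz)] else acc2) acc)
        = (fun (acc : List (Int × Int)) j => acc ++
            (PySem.List.pyRange 0 nz 1).flatMap (fun k => cellA nx ny nz i j k)) from by
      funext acc j; exact h1 i j acc]
    exact PySem.List.foldl_append_eq_flatMap _ _ _
  unfold iter_neighbors
  rw [show (fun (acc : List (Int × Int)) i =>
      (PySem.List.pyRange 0 ny 1).foldl (fun acc j =>
        (PySem.List.pyRange 0 nz 1).foldl (fun acc k =>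
          let a := lattice_index i j k nx ny nz
          let acc1 := if i + 1 < nx then acc ++ [(a, lattice_index (i+1) j k nx ny nz)] else acc
          let acc2 := if j + 1 < ny then acc1 ++ [(a, lattice_index i (j+1) k nx ny nz)] else acc1
          if k + 1 < nz then acc2 ++ [(a, lattice_index i j (k+1) nx ny nz)] else acc2) acc) acc)
      = (fun (acc : List (Int × Int)) i => acc ++
          (PySem.List.pyRange 0 ny 1).flatMap (fun j =>
            (PySem.List.pyRange 0 nz 1).flatMap (fun k => cellA nx ny nz i j k))) from by
    funext acc i; exact h2 i acc]
  rw [PySem.List.foldl_append_eq_flatMap]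
  simp

theorem range_mul_flatMap {α : Type} (N M : Nat) (g : Nat → List α) :
    (List.range (N * M)).flatMap g
      = (List.range N).flatMap (fun i => (List.range M).flatMap (fun j => g (i * M + j))) := by
  induction N with
  | zero => simp
  | succ N ih =>
    rw [Nat.succ_mul, List.range_add, List.flatMap_append, ih, List.range_succ,
      List.flatMap_append, List.flatMap_map]
    simp

theorem pyRange_mul_flatMap {α : Type} (n m : Int) (hn : 0 ≤ n) (hm : 0 ≤ m) (g : Int → List α) :
    (PySem.List.pyRange 0 (n * m) 1).flatMap g
      = (PySem.List.pyRange 0 n 1).flatMap (fun i =>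
          (PySem.List.pyRange 0 m 1).flatMap (fun j => g (i * m + j))) := by
  obtain ⟨N, rfl⟩ := Int.eq_ofNat_of_zero_le hn
  obtain ⟨M, rfl⟩ := Int.eq_ofNat_of_zero_le hm
  have hmul : ((N : Int) * (M : Int)) = ((N * M : Nat) : Int) := by push_cast; ring
  rw [hmul, PySem.List.pyRange_zero_nat, PySem.List.pyRange_zero_nat, PySem.List.pyRange_zero_nat,
    List.flatMap_map, List.flatMap_map, range_mul_flatMap N M (fun k => g (k : Int))]
  refine List.flatMap_congr (fun i _ => ?_)
  rw [List.flatMap_map]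
  refine List.flatMap_congr (fun j _ => ?_)
  push_cast
  rfl

theorem cellC_eq_cellA (nx ny nz i j k : Int) (hy : 0 < ny) (hz : 0 < nz)
    (hi0 : 0 ≤ i) (hi : i < nx) (hj0 : 0 ≤ j) (hj : j < ny) (hk0 : 0 ≤ k) (hk : k < nz) :
    cellC (ny * nz) (nx * (ny * nz)) nz (i * (ny * nz) + (j * nz + k)) = cellA nx ny nz i j k := by
  have hr0 : 0 ≤ j * nz + k := by positivity
  have hrS : j * nz + k < ny * nz := by nlinarith
  have hmodS : PySem.Int.mod (i * (ny * nz) + (j * nz + k)) (ny * nz) = j * nz + k := by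
    rw [PySem.Int.mod_eq_emod_of_pos (by positivity)]
    have : i * (ny * nz) + (j * nz + k) = (j * nz + k) + (ny * nz) * i := by ring
    rw [this, Int.add_mul_emod_self_left, Int.emod_eq_of_lt hr0 hrS]
  have hmodz : PySem.Int.mod (i * (ny * nz) + (j * nz + k)) nz = k := by
    rw [PySem.Int.mod_eq_emod_of_pos hz]
    have : i * (ny * nz) + (j * nz + k) = k + nz * (i * ny + j) := by ring
    rw [this, Int.add_mul_emod_self_left, Int.emod_eq_of_lt hk0 hk]
  have hcx : (i * (ny * nz) + (j * nz + k)) + ny * nz < nx * (ny * nz) ↔ i + 1 < nx := by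
    constructor
    · intro h
      by_contra hc
      push Not at hc
      nlinarith
    · intro h
      nlinarith
  have hcy : j * nz + k + nz < ny * nz ↔ j + 1 < ny := by
    constructor
    · intro h
      by_contra hc
      push Not at hc
      nlinarith
    · intro h
      nlinarith
  simp only [cellC, cellX, cellY, cellZ, cellA, lattice_index, hmodS, hmodz, hcx, hcy]
  split_ifs with h1 h2 h3 <;> try omega
  all_goals simp [Prod.ext_iff] <;> try (and_intros <;> ring)

theorem flatMap_append2_perm {α β : Type} (l : List α) (f g : α → List β) :
    (l.flatMap (fun a => f a ++ g a)).Perm (l.flatMap f ++ l.flatMap g) := by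
  induction l with
  | nil => simp
  | cons a l ih =>
    simp only [List.flatMap_cons]
    refine (ih.append_left (f a ++ g a)).trans ?_
    rw [List.append_assoc, List.append_assoc]
    exact (List.perm_append_comm_assoc (g a) _ _).append_left _

theorem B_flat (nx ny nz : Int) (h : ¬ (nx ≤ 0 ∨ ny ≤ 0 ∨ nz ≤ 0)) :
    iter_neighbors_alt nx ny nz =
      PySem.List.sorted2
        ((PySem.List.pyRange 0 (nx * (ny * nz)) 1).flatMap (cellX (ny * nz) (nx * (ny * nz))) ++
         (PySem.List.pyRange 0 (nx * (ny * nz)) 1).flatMap (cellY (ny * nz) nz) ++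
         (PySem.List.pyRange 0 (nx * (ny * nz)) 1).flatMap (cellZ nz))
        (fun e => e.1) (fun e => -e.2) := by
  unfold iter_neighbors_alt
  rw [if_neg h]
  have ex : (PySem.List.pyRange 0 (nx * (ny * nz)) 1).foldl
      (fun acc a => if a + ny * nz < nx * (ny * nz) then acc ++ [(a, a + ny * nz)] else acc) []
      = (PySem.List.pyRange 0 (nx * (ny * nz)) 1).flatMap (cellX (ny * nz) (nx * (ny * nz))) := by
    rw [show (fun (acc : List (Int × Int)) a =>
        if a + ny * nz < nx * (ny * nz) then acc ++ [(a, a + ny * nz)] else acc)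
        = (fun (acc : List (Int × Int)) a => acc ++ cellX (ny * nz) (nx * (ny * nz)) a) from by
      funext acc a; simp only [cellX]; split_ifs <;> simp]
    rw [PySem.List.foldl_append_eq_flatMap]; simp
  have ey : (PySem.List.pyRange 0 (nx * (ny * nz)) 1).foldl
      (fun acc a => if PySem.Int.mod a (ny * nz) + nz < ny * nz then acc ++ [(a, a + nz)] else acc) []
      = (PySem.List.pyRange 0 (nx * (ny * nz)) 1).flatMap (cellY (ny * nz) nz) := by
    rw [show (fun (acc : List (Int × Int)) a =>
        if PySem.Int.mod a (ny * nz) + nz < ny * nz then acc ++ [(a, a + nz)] else acc)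
        = (fun (acc : List (Int × Int)) a => acc ++ cellY (ny * nz) nz a) from by
      funext acc a; simp only [cellY]; split_ifs <;> simp]
    rw [PySem.List.foldl_append_eq_flatMap]; simp
  have ez : (PySem.List.pyRange 0 (nx * (ny * nz)) 1).foldl
      (fun acc a => if PySem.Int.mod a nz + 1 < nz then acc ++ [(a, a + 1)] else acc) []
      = (PySem.List.pyRange 0 (nx * (ny * nz)) 1).flatMap (cellZ nz) := by
    rw [show (fun (acc : List (Int × Int)) a =>
        if PySem.Int.mod a nz + 1 < nz then acc ++ [(a, a + 1)] else acc)
        = (fun (acc : List (Int × Int)) a => acc ++ cellZ nz a) from by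
      funext acc a; simp only [cellZ]; split_ifs <;> simp]
    rw [PySem.List.foldl_append_eq_flatMap]; simp
  simp only [ex, ey, ez]

-- sorted2 specialised to our key is the insertion-sort fold with pvBefore
theorem sorted2_eq_fold (xs : List (Int × Int)) :
    PySem.List.sorted2 xs (fun e => e.1) (fun e => -e.2)
      = xs.foldl (fun acc x => PySem.List.insertBy pvBefore x acc) [] := rfl

theorem pvBefore_asym {x y : Int × Int} (h : pvBefore x y = true) : pvBefore y x = false := by
  rw [pvBefore_iff] at h
  by_contra hc
  rw [Bool.not_eq_false, pvBefore_iff] at hc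
  omega

theorem pvBefore_trans' {x y z : Int × Int} (h1 : pvBefore x y = true)
    (h2 : pvBefore z y = false) : pvBefore z x = false := by
  rw [pvBefore_iff] at h1
  rw [Bool.eq_false_iff, Ne, pvBefore_iff] at h2 ⊢
  omega

theorem pvBefore_antisymm {x y : Int × Int} (h1 : pvBefore x y = false)
    (h2 : pvBefore y x = false) : x = y := by
  rw [Bool.eq_false_iff, Ne, pvBefore_iff] at h1 h2
  have : x.1 = y.1 ∧ x.2 = y.2 := by omega
  exact Prod.ext this.1 this.2

theorem pairwise_insertBy (x : Int × Int) (acc : List (Int × Int))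
    (h : acc.Pairwise (fun a b => pvBefore b a = false)) :
    (PySem.List.insertBy pvBefore x acc).Pairwise (fun a b => pvBefore b a = false) := by
  induction acc with
  | nil => simp [PySem.List.insertBy]
  | cons y ys ih =>
    rw [List.pairwise_cons] at h
    by_cases hb : pvBefore x y = true
    · rw [show PySem.List.insertBy pvBefore x (y :: ys) = x :: y :: ys from by
        simp [PySem.List.insertBy, hb]]
      refine List.pairwise_cons.2 ⟨?_, List.pairwise_cons.2 ⟨h.1, h.2⟩⟩
      intro z hz
      rcases List.mem_cons.1 hz with rfl | hz'
      · exact pvBefore_asym hb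
      · exact pvBefore_trans' hb (h.1 z hz')
    · rw [Bool.not_eq_true] at hb
      rw [show PySem.List.insertBy pvBefore x (y :: ys) = y :: PySem.List.insertBy pvBefore x ys from by
        simp [PySem.List.insertBy, hb]]
      refine List.pairwise_cons.2 ⟨?_, ih h.2⟩
      intro z hz
      rcases (PySem.List.mem_insertBy pvBefore x z ys).1 hz with rfl | hz'
      · exact hb
      · exact h.1 z hz'

theorem pairwise_foldl_insert (xs : List (Int × Int)) :
    ∀ acc, acc.Pairwise (fun a b => pvBefore b a = false) →
      (xs.foldl (fun acc x => PySem.List.insertBy pvBefore x acc) acc).Pairwise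
        (fun a b => pvBefore b a = false) := by
  induction xs with
  | nil => intro acc h; exact h
  | cons x xs ih =>
    intro acc h
    exact ih _ (pairwise_insertBy x acc h)

theorem sorted2_eq_of_perm_of_pairwise (xs ys : List (Int × Int))
    (hperm : ys.Perm xs) (hp : ys.Pairwise (fun a b => pvBefore a b = true)) :
    PySem.List.sorted2 xs (fun e => e.1) (fun e => -e.2) = ys := by
  have hzs := pairwise_foldl_insert xs [] List.Pairwise.nil
  rw [← sorted2_eq_fold] at hzs
  have hpz : (PySem.List.sorted2 xs (fun e => e.1) (fun e => -e.2)).Perm ys :=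
    (PySem.List.sorted2_perm xs _ _ false).trans hperm.symm
  refine List.eq_of_perm_of_sorted (le := fun a b => pvBefore b a = false)
    (fun a b _ _ h1 h2 => pvBefore_antisymm h2 h1) hzs ?_ hpz
  exact hp.imp (fun h => pvBefore_asym h)

theorem pyRange_pairwise_lt (n : Int) :
    (PySem.List.pyRange 0 n 1).Pairwise (· < ·) := by
  by_cases hn : 0 ≤ n
  · obtain ⟨N, rfl⟩ := Int.eq_ofNat_of_zero_le hn
    rw [PySem.List.pyRange_zero_nat]
    exact List.pairwise_lt_range.map _ (by intro a b h; exact_mod_cast h)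
  · rw [PySem.List.pyRange_one_eq_nil (by omega)]
    exact List.Pairwise.nil

theorem mem_cellC_fst {S n nz a : Int} {x : Int × Int}
    (hx : x ∈ cellC S n nz a) : x.1 = a := by
  simp only [cellC, cellX, cellY, cellZ, List.mem_append] at hx
  rcases hx with h | h | h <;> (split_ifs at h <;> simp_all)

theorem pairwise_cellC (S nz : Int) (hz : 0 < nz) (hSz : nz ≤ S) (n a : Int) :
    (cellC S n nz a).Pairwise (fun p q => pvBefore p q = true) := by
  have hmS : 0 ≤ PySem.Int.mod a S := by
    rw [PySem.Int.mod_eq_emod_of_pos (by omega)]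
    exact Int.emod_nonneg a (by omega)
  have hmz : 0 ≤ PySem.Int.mod a nz := by
    rw [PySem.Int.mod_eq_emod_of_pos hz]
    exact Int.emod_nonneg a (by omega)
  simp only [cellC, cellX, cellY, cellZ]
  split_ifs with h1 h2 h3 <;>
    simp_all [List.pairwise_cons, pvBefore_iff] <;> omega

theorem pairwise_flat (nx ny nz : Int) (hy : 0 < ny) (hz : 0 < nz) :
    ((PySem.List.pyRange 0 (nx * (ny * nz)) 1).flatMap
        (cellC (ny * nz) (nx * (ny * nz)) nz)).Pairwise (fun p q => pvBefore p q = true) := by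
  rw [List.pairwise_flatMap]
  refine ⟨fun a _ => pairwise_cellC (ny * nz) nz hz (by nlinarith) _ a, ?_⟩
  refine (pyRange_pairwise_lt _).imp ?_
  intro a b hab x hx y hy'
  have h1 := mem_cellC_fst hx
  have h2 := mem_cellC_fst hy'
  rw [pvBefore_iff]
  omega

-- ===== VERDICT (by name: the statement is the Claim_ definition above) =====
theorem iter_neighbors_spec : Claim_equal_iter_neighbors := by
  intro nx ny nz _
  unfold Spec_iter_neighbors
  by_cases h : nx ≤ 0 ∨ ny ≤ 0 ∨ nz ≤ 0
  · rw [A_flat]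
    unfold iter_neighbors_alt
    rw [if_pos h]
    rcases h with h | h | h
    · rw [PySem.List.pyRange_one_eq_nil h]; simp
    · rw [PySem.List.pyRange_one_eq_nil h]; simp
    · rw [PySem.List.pyRange_one_eq_nil h]; simp
  · push Not at h
    obtain ⟨hx, hy, hz⟩ := h
    have hAflat : iter_neighbors nx ny nz =
        (PySem.List.pyRange 0 (nx * (ny * nz)) 1).flatMap
          (cellC (ny * nz) (nx * (ny * nz)) nz) := by
      rw [A_flat, pyRange_mul_flatMap nx (ny * nz) (by omega) (by positivity)]
      refine (List.flatMap_congr (fun i hi => ?_)).symm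
      rw [pyRange_mul_flatMap ny nz (by omega) (by omega)]
      refine List.flatMap_congr (fun j hj => ?_)
      refine List.flatMap_congr (fun k hk => ?_)
      rw [PySem.List.mem_pyRange_one] at hi hj hk
      exact cellC_eq_cellA nx ny nz i j k hy hz hi.1 hi.2 hj.1 hj.2 hk.1 hk.2
    rw [B_flat nx ny nz (by omega), hAflat]
    refine (sorted2_eq_of_perm_of_pairwise _ _ ?_ ?_).symm
    · refine (flatMap_append2_perm _ (cellX (ny * nz) (nx * (ny * nz)))
        (fun a => cellY (ny * nz) nz a ++ cellZ nz a)).trans ?_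
      rw [List.append_assoc]
      exact (flatMap_append2_perm _ _ _).append_left _
    · exact pairwise_flat nx ny nz hy hz
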